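-- pv_equiv track=rewrite | github.com/jyj1111/Bjo | 프로그래머스/3/258707. n ＋ 1 카드게임/n ＋ 1 카드게임.py | find
-- ===== SOURCE A (Python) =====
-- from collections import defaultdict
--
-- def find(arr1,arr2,num):
--
--     dic=defaultdict(int)
--     for num1 in arr1:
--         dic[num+1-num1]=num1
--     for num2 in arr2:
--         if num2 in dic.keys():
--             arr1.remove(num+1-num2)
--             arr2.remove(num2)
--             return True
--     return False
-- ===== SOURCE B (Python) =====
-- def find(arr1, arr2, num):
--     # Nested scan instead of A's precomputed complement dict; same removals on success.
--     for num2 in arr2: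
--         for num1 in arr1:
--             if num1 + num2 == num + 1:
--                 arr1.remove(num + 1 - num2)
--                 arr2.remove(num2)
--                 return True
--     return False
-- ===== Notes on version B (the rewrite author's own statement) =====
-- stated objective: simpler
-- what changed: Replaces the precomputed complement dict with a direct nested scan over arr2 and arr1 testing num1 + num2 == num + 1, performing the same list removals on success.
import Mathlib
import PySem

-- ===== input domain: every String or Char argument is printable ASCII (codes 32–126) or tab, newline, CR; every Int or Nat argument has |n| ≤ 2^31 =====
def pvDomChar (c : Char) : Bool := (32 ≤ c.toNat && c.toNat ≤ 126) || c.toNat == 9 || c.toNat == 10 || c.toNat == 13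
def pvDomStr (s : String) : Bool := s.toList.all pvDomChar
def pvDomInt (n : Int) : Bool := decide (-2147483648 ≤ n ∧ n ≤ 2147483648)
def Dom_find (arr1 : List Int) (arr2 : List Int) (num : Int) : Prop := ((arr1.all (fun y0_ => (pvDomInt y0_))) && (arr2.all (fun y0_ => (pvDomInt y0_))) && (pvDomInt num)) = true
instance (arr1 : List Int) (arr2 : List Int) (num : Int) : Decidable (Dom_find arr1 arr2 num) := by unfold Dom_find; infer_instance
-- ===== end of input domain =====

-- B replaces A's precomputed complement dict by a direct nested scan; both mutate
-- arr1/arr2 identically on success in Python — the theorems are about the return value only.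

-- ===== PORT A =====
-- loop 'for num2 in arr2: if num2 in dic.keys(): …; return True' (the removes do not affect the return value)
def findScanA (dic : PySem.Dict Int Int) : List Int → Bool
  | [] => false
  | num2 :: rest => if dic.contains num2 then true else findScanA dic rest

def find (arr1 : List Int) (arr2 : List Int) (num : Int) : Bool :=
  let dic := arr1.foldl (fun d num1 => d.insert (num + 1 - num1) num1) PySem.Dict.empty
  findScanA dic arr2

-- ===== PORT B =====
-- inner loop 'for num1 in arr1: if num1 + num2 == num + 1: …; return True'
def findInnerB (num : Int) (num2 : Int) : List Int → Bool
  | [] => false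
  | num1 :: rest => if num1 + num2 == num + 1 then true else findInnerB num num2 rest

def findOuterB (arr1 : List Int) (num : Int) : List Int → Bool
  | [] => false
  | num2 :: rest => if findInnerB num num2 arr1 then true else findOuterB arr1 num rest

def find_alt (arr1 : List Int) (arr2 : List Int) (num : Int) : Bool :=
  findOuterB arr1 num arr2

-- ===== PRECONDITION & SPEC =====
def Spec_find (arr1 : List Int) (arr2 : List Int) (num : Int) (out : Bool) : Prop := out = find_alt arr1 arr2 num
instance (arr1 : List Int) (arr2 : List Int) (num : Int) (out : Bool) : Decidable (Spec_find arr1 arr2 num out) := by unfold Spec_find; infer_instance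

-- ===== CLAIM (what is proved, stated in full; the proofs are below) =====
def Claim_equal_find : Prop := ∀ (arr1 : List Int) (arr2 : List Int) (num : Int), Dom_find arr1 arr2 num → Spec_find arr1 arr2 num (find arr1 arr2 num)

-- ===== LEMMAS AND PROOFS =====

-- the dict built by A contains num2 iff B's inner scan over arr1 finds a complement
theorem contains_foldl_eq_inner (num num2 : Int) :
    ∀ (arr1 : List Int) (d : PySem.Dict Int Int),
      (arr1.foldl (fun d num1 => d.insert (num + 1 - num1) num1) d).contains num2
        = (findInnerB num num2 arr1 || d.contains num2) := by
  intro arr1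
  induction arr1 with
  | nil => intro d; simp [findInnerB]
  | cons n1 rest ih =>
    intro d
    simp only [List.foldl_cons, ih, findInnerB, PySem.Dict.contains_insert]
    have h : (num2 == num + 1 - n1) = (n1 + num2 == num + 1) := by
      by_cases h' : n1 + num2 = num + 1
      · simp [show num2 = num + 1 - n1 by omega]
      · simp [show num2 ≠ num + 1 - n1 by omega, h']
    cases hb : findInnerB num num2 rest <;> simp [h] <;> tauto

theorem scan_eq_outer (num : Int) (arr1 : List Int) :
    ∀ arr2 : List Int,
      findScanA (arr1.foldl (fun d num1 => d.insert (num + 1 - num1) num1) PySem.Dict.empty) arr2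
        = findOuterB arr1 num arr2 := by
  intro arr2
  induction arr2 with
  | nil => rfl
  | cons n2 rest ih =>
    simp only [findScanA, findOuterB, ih, contains_foldl_eq_inner, PySem.Dict.contains_empty,
      Bool.or_false]

-- ===== VERDICT (by name: the statement is the Claim_ definition above) =====
theorem find_spec : Claim_equal_find := by
  intro arr1 arr2 num _
  unfold Spec_find find find_alt
  exact scan_eq_outer num arr1 arr2
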